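-- pv_equiv track=rewrite | github.com/raeez/chiral-bar-cobar | compute/lib/shadow_cohft_independent.py | _wn_conformal_weight
-- ===== SOURCE A (Python) =====
-- from typing import Dict, List, Tuple
--
-- def _wn_conformal_weight(N: int, max_q: int) -> List[int]:
--     """
--     Compute K_q under conformal weight convention: generator of
--     spin s contributes modes at weights s, s+1, s+2, ...
--
--     The generating function is:
--         prod_{s=2}^{N} prod_{n >= s} 1/(1 - x^n)
--     = prod_{s=2}^{N} [prod_{n >= 1} 1/(1-x^n)] / [prod_{n=1}^{s-1} 1/(1-x^n)]
--
--     For W_2 (Virasoro, single generator at spin 2):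
--         prod_{n >= 2} 1/(1 - x^n) = partitions with all parts >= 2
--         K_0 = 1, K_1 = 0, K_2 = 1, K_3 = 1, K_4 = 2, K_5 = 2, K_6 = 4
--         This does NOT match the table [1,1,2,3,5,7,11].
--
--     For W_2 under the "single mode per weight" convention:
--         prod_{n >= 1} 1/(1 - x^n) = p(q) (unrestricted partitions)
--         K_0 = 1, K_1 = 1, K_2 = 2, K_3 = 3, K_4 = 5, K_5 = 7, K_6 = 11
--         This MATCHES the table!
--
--     Conclusion: the table uses the convention that each generator
--     contributes modes starting at weight 1 (not at its conformal
--     spin), i.e., REDUCED weight convention.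
--     """
--     # Implement as product of partition series with specified
--     # minimum parts
--     coeffs = [0] * (max_q + 1)
--     coeffs[0] = 1
--
--     for s in range(2, N + 1):
--         # Generator of spin s contributes modes at weights s, s+1, ...
--         # In the CONFORMAL convention, minimum part is s.
--         # But from the table comparison, the convention is min part 1.
--         # We implement BOTH:
--         pass
--
--     # Conformal convention: min parts = spin of generator
--     result = [0] * (max_q + 1)
--     result[0] = 1
--     for s in range(2, N + 1):
--         new_result = result[:]
--         for n in range(s, max_q + 1):
--             for q in range(n, max_q + 1):
--                 new_result[q] += result[q - n]
--         result = new_result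
--
--     return result
-- ===== SOURCE B (Python) =====
-- from typing import List
--
-- def _wn_conformal_weight(N: int, max_q: int) -> List[int]:
--     # Same series, but each spin-s pass uses a running prefix sum of the old
--     # coefficients instead of the quadratic double loop over (n, q).
--     result = [0] * (max_q + 1)
--     result[0] = 1
--     for s in range(2, N + 1):
--         prefix = []
--         acc = 0
--         for c in result:
--             acc += c
--             prefix.append(acc)
--         result = [result[q] + (prefix[q - s] if q >= s else 0)
--                   for q in range(max_q + 1)]
--     return result
-- ===== Notes on version B (the rewrite author's own statement) =====
-- stated objective: faster
-- what changed: Each spin-s pass multiplies by the polynomial 1 + x^s + ... + x^max_q; B replaces A's double (n,q) convolution loop with a single running prefix-sum pass, new[q] = result[q] + prefix[q-s].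
import Mathlib
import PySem

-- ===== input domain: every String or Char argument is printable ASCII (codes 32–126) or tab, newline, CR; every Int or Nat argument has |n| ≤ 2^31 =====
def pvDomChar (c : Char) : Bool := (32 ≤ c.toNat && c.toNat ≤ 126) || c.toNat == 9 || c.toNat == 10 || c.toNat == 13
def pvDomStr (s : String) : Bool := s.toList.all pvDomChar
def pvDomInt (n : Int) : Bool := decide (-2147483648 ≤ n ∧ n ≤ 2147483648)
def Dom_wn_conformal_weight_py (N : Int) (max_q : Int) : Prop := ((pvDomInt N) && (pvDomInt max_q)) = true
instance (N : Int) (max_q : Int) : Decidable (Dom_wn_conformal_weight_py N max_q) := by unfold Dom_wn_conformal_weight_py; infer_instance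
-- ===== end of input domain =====

-- B replaces A's double (n,q) convolution loop per spin s by a single running
-- prefix-sum pass (new[q] = result[q] + prefix[q-s]); measured faster in a timing run.

-- ===== PORT A =====
-- A's 'coeffs' local is computed and never read (its 'for s' loop body is 'pass'): dead code, omitted.
def wn_conformal_weight_py (N : Int) (max_q : Int) : List Int :=
  (PySem.List.pyRange 2 (N + 1) 1).foldl (fun result s =>
    (PySem.List.pyRange s (max_q + 1) 1).foldl (fun new_result n =>
      (PySem.List.pyRange n (max_q + 1) 1).foldl (fun new_result q =>
        PySem.List.pySetD new_result q
          (PySem.List.pyGetD new_result q 0 + PySem.List.pyGetD result (q - n) 0)) new_result)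
      result)
    (PySem.List.pySetD (List.replicate (max_q + 1).toNat (0 : Int)) 0 1)

-- ===== PORT B =====
def wn_conformal_weight_py_alt (N : Int) (max_q : Int) : List Int :=
  (PySem.List.pyRange 2 (N + 1) 1).foldl (fun result s =>
    let pref : List Int :=
      (result.foldl (fun (p : List Int × Int) c => (p.1 ++ [p.2 + c], p.2 + c)) ([], 0)).1
    (PySem.List.pyRange 0 (max_q + 1) 1).map (fun q =>
      PySem.List.pyGetD result q 0 +
        if s ≤ q then PySem.List.pyGetD pref (q - s) 0 else 0))
    (PySem.List.pySetD (List.replicate (max_q + 1).toNat (0 : Int)) 0 1)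

-- ===== PRECONDITION & SPEC =====
-- Pre_ excludes exactly max_q < 0, where Python A raises IndexError on 'coeffs[0] = 1'.
def Pre_wn_conformal_weight_py (N : Int) (max_q : Int) : Prop := 0 ≤ max_q
instance (N : Int) (max_q : Int) : Decidable (Pre_wn_conformal_weight_py N max_q) := by
  unfold Pre_wn_conformal_weight_py; infer_instance
def pvWitness_wn_conformal_weight_py : Int × Int := (4, 6)

def Spec_wn_conformal_weight_py (N : Int) (max_q : Int) (out : List Int) : Prop :=
  out = wn_conformal_weight_py_alt N max_q
instance (N : Int) (max_q : Int) (out : List Int) : Decidable (Spec_wn_conformal_weight_py N max_q out) := by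
  unfold Spec_wn_conformal_weight_py; infer_instance

-- ===== CLAIM (what is proved, stated in full; the proofs are below) =====
def Claim_equal_wn_conformal_weight_py : Prop :=
  ∀ (N : Int) (max_q : Int), Dom_wn_conformal_weight_py N max_q →
    Pre_wn_conformal_weight_py N max_q →
    Spec_wn_conformal_weight_py N max_q (wn_conformal_weight_py N max_q)

-- ===== LEMMAS AND PROOFS =====

-- A's inner update, reading from the fixed old list `res` (proof-only abbreviation;
-- definitionally equal to the lambda in port A).
def pvStep (res : List Int) (n : Int) (nr : List Int) (q : Int) : List Int :=
  PySem.List.pySetD nr q (PySem.List.pyGetD nr q 0 + PySem.List.pyGetD res (q - n) 0)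

lemma pv_getD_set (l : List Int) (i : Nat) (a : Int) (j : Nat) :
    (l.set i a).getD j 0 = if i = j ∧ j < l.length then a else l.getD j 0 := by
  simp only [List.getD_eq_getElem?_getD, List.getElem?_set]
  by_cases h1 : i = j
  · subst h1
    by_cases h2 : i < l.length
    · simp [h2]
    · simp [h2]
  · simp [h1]

lemma pv_getD_foldl_step (res : List Int) (n : Int) :
    ∀ (l : List Int) (racc : List Int), l.Pairwise (· < ·) → (∀ q ∈ l, 0 ≤ q) →
    ∀ (j : Nat),
      (l.foldl (pvStep res n) racc).getD j 0 =
        racc.getD j 0 +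
          (if (j : Int) ∈ l ∧ j < racc.length then PySem.List.pyGetD res ((j : Int) - n) 0 else 0) := by
  intro l
  induction l with
  | nil => intro racc _ _ j; simp
  | cons q t ih =>
    intro racc hpw hpos j
    have hq0 : 0 ≤ q := hpos q (List.mem_cons_self ..)
    have hqt : ∀ x ∈ t, q < x := fun x hx => (List.pairwise_cons.mp hpw).1 x hx
    have hstep : pvStep res n racc q =
        racc.set q.toNat (racc.getD q.toNat 0 + PySem.List.pyGetD res (q - n) 0) := by
      rw [pvStep, PySem.List.pySetD_of_nonneg _ _ hq0, PySem.List.pyGetD_of_nonneg _ _ hq0]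
    rw [List.foldl_cons, ih _ (List.pairwise_cons.mp hpw).2
        (fun x hx => hpos x (List.mem_cons_of_mem _ hx)) j]
    rw [hstep, pv_getD_set]
    have hlen : (racc.set q.toNat (racc.getD q.toNat 0 + PySem.List.pyGetD res (q - n) 0)).length
        = racc.length := by simp
    rw [hlen]
    by_cases hjq : (j : Int) = q
    · have hjt : (j : Int) ∉ t := fun h => absurd (hqt _ h) (by omega)
      have hjn : q.toNat = j := by omega
      by_cases hjl : j < racc.length
      · have hqnt : q ∉ t := fun h => absurd (hqt _ h) (lt_irrefl q)
        simp only [List.mem_cons, hjq, hjl, hjn, and_true]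
        simp [hqnt]
      · simp [hjq, hjl, hjn]
    · have hne : q.toNat ≠ j := by omega
      simp [hne, hjq]

lemma pvStep_length (res : List Int) (n : Int) (nr : List Int) (q : Int) :
    (pvStep res n nr q).length = nr.length := by
  simp [pvStep, PySem.List.length_pySetD]

lemma pv_foldl_step_length (res : List Int) (n : Int) :
    ∀ (l : List Int) (racc : List Int), (l.foldl (pvStep res n) racc).length = racc.length := by
  intro l
  induction l with
  | nil => intro racc; rfl
  | cons q t ih => intro racc; rw [List.foldl_cons, ih, pvStep_length]

lemma pv_getD_outer (res : List Int) (mq : Int) :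
    ∀ (ns : List Int) (racc : List Int), (∀ x ∈ ns, 0 ≤ x) →
    ∀ (j : Nat),
      (ns.foldl (fun nr n => (PySem.List.pyRange n (mq + 1) 1).foldl (pvStep res n) nr) racc).getD j 0 =
        racc.getD j 0 +
          ((ns.map (fun n =>
            if n ≤ (j : Int) ∧ (j : Int) < mq + 1 ∧ j < racc.length then
              PySem.List.pyGetD res ((j : Int) - n) 0 else 0)).sum) := by
  intro ns
  induction ns with
  | nil => intro racc _ j; simp
  | cons n t ih =>
    intro racc hpos j
    have hn0 : 0 ≤ n := hpos n (List.mem_cons_self ..)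
    rw [List.foldl_cons, ih _ (fun x hx => hpos x (List.mem_cons_of_mem _ hx)) j]
    rw [pv_foldl_step_length]
    rw [pv_getD_foldl_step res n _ racc (PySem.List.pairwise_lt_pyRange_one _ _)
        (fun q hq => by have := (PySem.List.mem_pyRange_one.mp hq).1; omega) j]
    have hmem : ((j : Int) ∈ PySem.List.pyRange n (mq + 1) 1) ↔ (n ≤ (j:Int) ∧ (j:Int) < mq + 1) :=
      PySem.List.mem_pyRange_one
    simp only [List.map_cons, List.sum_cons, hmem]
    by_cases hc : n ≤ (j:Int) ∧ (j:Int) < mq + 1 ∧ j < racc.length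
    · rw [if_pos ⟨⟨hc.1, hc.2.1⟩, hc.2.2⟩, if_pos hc]; ring
    · have : ¬((n ≤ (j:Int) ∧ (j:Int) < mq + 1) ∧ j < racc.length) := by tauto
      rw [if_neg this, if_neg hc]; ring

lemma pv_revSum (res : List Int) :
    ∀ (d : Nat), d < res.length →
      ((List.range (d + 1)).map (fun k => res.getD (d - k) 0)).sum = (res.take (d + 1)).sum := by
  intro d
  induction d with
  | zero => intro h; simp [List.take_add_one, List.getElem?_eq_getElem h]
  | succ d ih =>
    intro hd
    rw [List.range_succ_eq_map, List.map_cons, List.sum_cons, List.map_map]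
    have h1 : ((List.range (d + 1)).map ((fun k => res.getD (d + 1 - k) 0) ∘ Nat.succ)).sum
        = ((List.range (d + 1)).map (fun k => res.getD (d - k) 0)).sum := by
      congr 1
      apply List.map_congr_left
      intro k _
      simp only [Function.comp]
      congr 1
      omega
    rw [h1, ih (by omega), List.sum_take_succ res (d+1) hd]
    have h2 : res[d + 1]? = some (res[d + 1]'(by omega)) := List.getElem?_eq_getElem (by omega)
    simp [h2, add_comm]

lemma pv_pref_spec :
    ∀ (res : List Int) (p : List Int) (t : Int),
      (res.foldl (fun (p : List Int × Int) c => (p.1 ++ [p.2 + c], p.2 + c)) (p, t)).1 =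
        p ++ (List.range res.length).map (fun k => t + (res.take (k + 1)).sum) := by
  intro res
  induction res with
  | nil => intro p t; simp
  | cons c r ih =>
    intro p t
    rw [List.foldl_cons, ih (p ++ [t + c]) (t + c)]
    rw [List.length_cons, List.range_succ_eq_map, List.map_cons, List.map_map]
    simp only [List.take_succ_cons, List.sum_cons]
    rw [List.append_assoc]
    congr 1
    simp only [List.singleton_append, List.cons.injEq]
    constructor
    · simp
    · apply List.map_congr_left
      intro k _
      simp [Function.comp]
      ring

lemma pv_sumA (res : List Int) (s : Int) (j : Nat) (mq : Int)
    (hjL : j < (mq + 1).toNat) (hr : res.length = (mq + 1).toNat) (hs : 0 ≤ s) :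
    ((PySem.List.pyRange s (mq + 1) 1).map (fun n =>
        if n ≤ (j : Int) ∧ (j : Int) < mq + 1 ∧ j < res.length then
          PySem.List.pyGetD res ((j : Int) - n) 0 else 0)).sum =
      if s ≤ (j : Int) then (res.take (((j : Int) - s).toNat + 1)).sum else 0 := by
  have hjm : (j : Int) < mq + 1 := by omega
  have hjlen : j < res.length := by omega
  have hmap : ∀ n ∈ PySem.List.pyRange s (mq + 1) 1,
      (if n ≤ (j : Int) ∧ (j : Int) < mq + 1 ∧ j < res.length then
        PySem.List.pyGetD res ((j : Int) - n) 0 else 0) =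
      (if n ≤ (j : Int) then PySem.List.pyGetD res ((j : Int) - n) 0 else 0) := by
    intro n _; simp [hjm, hjlen]
  rw [List.map_congr_left hmap]
  by_cases hsj : s ≤ (j : Int)
  · rw [if_pos hsj]
    rw [PySem.List.pyRange_one_append s ((j : Int) + 1) (mq + 1) (by omega) (by omega)]
    rw [List.map_append, List.sum_append]
    have hz : ((PySem.List.pyRange ((j : Int) + 1) (mq + 1) 1).map (fun n =>
        if n ≤ (j : Int) then PySem.List.pyGetD res ((j : Int) - n) 0 else 0)).sum = 0 := by
      apply List.sum_eq_zero
      intro x hx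
      simp only [List.mem_map] at hx
      obtain ⟨n, hn, rfl⟩ := hx
      have := (PySem.List.mem_pyRange_one.mp hn).1
      rw [if_neg (by omega)]
    rw [hz, add_zero]
    have hmap2 : ∀ n ∈ PySem.List.pyRange s ((j : Int) + 1) 1,
        (if n ≤ (j : Int) then PySem.List.pyGetD res ((j : Int) - n) 0 else 0) =
        res.getD ((j : Int) - n).toNat 0 := by
      intro n hn
      have h1 := PySem.List.mem_pyRange_one.mp hn
      rw [if_pos (by omega), PySem.List.pyGetD_of_nonneg _ _ (by omega)]
    rw [List.map_congr_left hmap2]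
    rw [PySem.List.pyRange_one, List.map_map]
    have hm : ((j : Int) + 1 - s).toNat = ((j : Int) - s).toNat + 1 := by omega
    rw [hm]
    have hmap3 : ∀ k ∈ List.range (((j : Int) - s).toNat + 1),
        ((fun n => res.getD ((j : Int) - n).toNat 0) ∘ (fun k : Nat => s + (k : Int))) k =
        res.getD (((j : Int) - s).toNat - k) 0 := by
      intro k hk
      simp only [List.mem_range] at hk
      simp only [Function.comp]
      congr 1
      omega
    rw [List.map_congr_left hmap3]
    exact pv_revSum res (((j : Int) - s).toNat) (by omega)
  · rw [if_neg hsj]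
    apply List.sum_eq_zero
    intro x hx
    simp only [List.mem_map] at hx
    obtain ⟨n, hn, rfl⟩ := hx
    have := (PySem.List.mem_pyRange_one.mp hn).1
    rw [if_neg (by omega)]

lemma pv_outer_length (res : List Int) (mq : Int) :
    ∀ (ns : List Int) (racc : List Int),
      (ns.foldl (fun nr n => (PySem.List.pyRange n (mq + 1) 1).foldl (pvStep res n) nr) racc).length
        = racc.length := by
  intro ns
  induction ns with
  | nil => intro racc; rfl
  | cons n t ih => intro racc; rw [List.foldl_cons, ih, pv_foldl_step_length]

lemma pv_step_eq (mq s : Int) (hs : 0 ≤ s) (res : List Int)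
    (hr : res.length = (mq + 1).toNat) :
    (PySem.List.pyRange s (mq + 1) 1).foldl (fun new_result n =>
        (PySem.List.pyRange n (mq + 1) 1).foldl (pvStep res n) new_result) res =
      (let pref : List Int :=
        (res.foldl (fun (p : List Int × Int) c => (p.1 ++ [p.2 + c], p.2 + c)) ([], 0)).1
      (PySem.List.pyRange 0 (mq + 1) 1).map (fun q =>
        PySem.List.pyGetD res q 0 +
          if s ≤ q then PySem.List.pyGetD pref (q - s) 0 else 0)) := by
  simp only []
  have hpref : (res.foldl (fun (p : List Int × Int) c => (p.1 ++ [p.2 + c], p.2 + c)) ([], 0)).1 =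
      (List.range res.length).map (fun k => 0 + (res.take (k + 1)).sum) :=
    pv_pref_spec res [] 0
  apply List.ext_getElem
  · rw [pv_outer_length, hr, List.length_map, PySem.List.length_pyRange_one]
    omega
  · intro j hj1 hj2
    have hjL : j < (mq + 1).toNat := by
      rw [pv_outer_length, hr] at hj1; exact hj1
    rw [← List.getD_eq_getElem _ 0 hj1, ← List.getD_eq_getElem _ 0 hj2]
    rw [pv_getD_outer res mq _ res
        (fun x hx => by have := (PySem.List.mem_pyRange_one.mp hx).1; omega) j]
    rw [pv_sumA res s j mq hjL hr hs]
    have hg : ((PySem.List.pyRange 0 (mq + 1) 1).map (fun q =>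
        PySem.List.pyGetD res q 0 +
          if s ≤ q then
            PySem.List.pyGetD
              ((res.foldl (fun (p : List Int × Int) c => (p.1 ++ [p.2 + c], p.2 + c)) ([], 0)).1)
              (q - s) 0
          else 0)).getD j 0 =
        PySem.List.pyGetD res (j : Int) 0 +
          if s ≤ (j : Int) then
            PySem.List.pyGetD
              ((res.foldl (fun (p : List Int × Int) c => (p.1 ++ [p.2 + c], p.2 + c)) ([], 0)).1)
              ((j : Int) - s) 0
          else 0 := by
      rw [← PySem.List.pyGetD_natCast]
      rw [PySem.List.pyGetD_map_pyRange_of_nonneg _ _ _ _ (by omega) (by omega : (j:Int) < mq + 1)]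
    rw [hg, hpref]
    rw [PySem.List.pyGetD_natCast]
    by_cases hsj : s ≤ (j : Int)
    · rw [if_pos hsj, if_pos hsj]
      rw [PySem.List.pyGetD_of_nonneg _ _ (by omega : (0:Int) ≤ (j : Int) - s)]
      rw [PySem.List.getD_map_range _ _ _ _ (by omega : ((j : Int) - s).toNat < res.length)]
      ring
    · rw [if_neg hsj, if_neg hsj]

lemma pv_foldl_congr_mem {f g : List Int → Int → List Int} (L : Nat)
    (hf : ∀ r s, 0 ≤ s → r.length = L → f r s = g r s)
    (hlen : ∀ r s, (f r s).length = r.length) :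
    ∀ (l : List Int), (∀ s ∈ l, 0 ≤ s) → ∀ (r : List Int), r.length = L →
      l.foldl f r = l.foldl g r := by
  intro l
  induction l with
  | nil => intro _ r _; rfl
  | cons s t ih =>
    intro hpos r hr
    have hs : 0 ≤ s := hpos s (List.mem_cons_self ..)
    have h2 : (f r s).length = L := by rw [hlen]; exact hr
    rw [List.foldl_cons, List.foldl_cons, ← hf r s hs hr]
    exact ih (fun x hx => hpos x (List.mem_cons_of_mem _ hx)) _ h2

-- ===== VERDICT (by name: the statement is the Claim_ definition above) =====
theorem wn_conformal_weight_py_spec : Claim_equal_wn_conformal_weight_py := by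
  intro N mq _ _
  unfold Spec_wn_conformal_weight_py wn_conformal_weight_py wn_conformal_weight_py_alt
  apply pv_foldl_congr_mem ((mq + 1).toNat)
  · intro r s hs hr
    exact pv_step_eq mq s hs r hr
  · intro r s
    exact pv_outer_length r mq (PySem.List.pyRange s (mq + 1) 1) r
  · intro x hx
    have := (PySem.List.mem_pyRange_one.mp hx).1
    omega
  · rw [PySem.List.length_pySetD, List.length_replicate]
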